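-- pv_equiv track=rewrite | github.com/ytkinroman/lab_1_complexity | quest_8/quest_8.py | place_mag
-- ===== SOURCE A (Python) =====
-- def is_safe(board: list, row: int, col: int) -> bool:
--     """Проверка, можно ли поставить магараджу на позицию."""
--     for i in range(len(board)):
--         if board[i][col] == 1 or board[row][i] == 1:
--             return False
--
--     for i in range(len(board)):
--         for j in range(len(board)):
--             if (i + j == row + col) or (i - j == row - col):
--                 if board[i][j] == 1:
--                     return False
--
--     knight_moves = [
--         (2, 1), (1, 2), (-1, 2), (-2, 1),
--         (-2, -1), (-1, -2), (1, -2), (2, -1)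
--     ]
--
--     for move in knight_moves:
--         new_row, new_col = row + move[0], col + move[1]
--         if 0 <= new_row < len(board) and 0 <= new_col < len(board):
--             if board[new_row][new_col] == 1:
--                 return False
--
--     return True
--
-- def place_mag(board: list, row: int, col: int, count: int, K: int) -> int:
--     """Рекурсивная функция для размещения магарадж на доске."""
--     if count == K:
--         return 1
--
--     total = 0
--     for i in range(row, len(board)):
--         for j in range(len(board)):
--             if is_safe(board, i, j):
--                 board[i][j] = 1
--                 total += place_mag(board, i, j, count + 1, K)
--                 board[i][j] = 0
--
--     return total
-- ===== SOURCE B (Python) =====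
-- def _maharaja_safe(board, n, i, j):
--     # single O(n) pass: column j, row i, and the two diagonals through (i, j)
--     for k in range(n):
--         if board[k][j] == 1 or board[i][k] == 1:
--             return False
--         c = i + j - k            # anti-diagonal cell (k, c)
--         if 0 <= c < n and board[k][c] == 1:
--             return False
--         c = j + k - i            # main diagonal cell (k, c)
--         if 0 <= c < n and board[k][c] == 1:
--             return False
--     for dr, dc in ((2, 1), (1, 2), (-1, 2), (-2, 1), (-2, -1), (-1, -2), (1, -2), (2, -1)):
--         r, c = i + dr, j + dc
--         if 0 <= r < n and 0 <= c < n and board[r][c] == 1: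
--             return False
--     return True
--
--
-- def place_mag(board, row, col, count, K):
--     if count == K:
--         return 1
--     n = len(board)
--     total = 0
--     for pos in range(row * n, n * n):   # one flat loop over the remaining cells
--         i, j = divmod(pos, n)
--         if _maharaja_safe(board, n, i, j):
--             board[i][j] = 1
--             total += place_mag(board, i, j, count + 1, K)
--             board[i][j] = 0
--     return total
-- ===== Notes on version B (the rewrite author's own statement) =====
-- stated objective: alternative
-- what changed: is_safe's full-board sweep for diagonal attacks is replaced by a single pass that probes only the column, the row and the two diagonals through the candidate cell (plus the 8 knight probes), and the two placement loops are flattened into one loop over cell indices decoded with divmod.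
-- outside the precondition, e.g. on place_mag([[1, 1], [1]], 0, 0, 0, 1): A returns 0, B returns 0; on place_mag([[1, 1], [1, 1]], -5, 0, 0, 1): A returns 0, B returns 0
import Mathlib
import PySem

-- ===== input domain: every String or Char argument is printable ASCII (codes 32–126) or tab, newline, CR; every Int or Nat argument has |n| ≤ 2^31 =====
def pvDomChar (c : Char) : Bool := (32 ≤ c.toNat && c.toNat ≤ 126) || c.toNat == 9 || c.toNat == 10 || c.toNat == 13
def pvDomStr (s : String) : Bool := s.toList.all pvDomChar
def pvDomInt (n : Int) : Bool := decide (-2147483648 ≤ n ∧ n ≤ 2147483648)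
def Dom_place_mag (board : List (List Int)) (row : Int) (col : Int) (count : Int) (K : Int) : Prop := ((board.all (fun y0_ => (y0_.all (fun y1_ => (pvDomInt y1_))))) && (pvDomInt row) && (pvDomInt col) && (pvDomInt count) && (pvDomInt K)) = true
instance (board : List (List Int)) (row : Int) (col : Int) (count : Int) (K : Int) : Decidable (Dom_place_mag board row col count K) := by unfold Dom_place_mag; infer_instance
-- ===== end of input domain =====

-- B replaces A's full-board diagonal sweep in is_safe by a single pass that probes only the column,
-- the row and the two diagonals through the candidate cell, and flattens the two placement loops into
-- one loop over flat cell indices decoded with divmod.  Python A mutates (and on non-0/1 cells does not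
-- fully restore) the board argument in place, and so does B; the equivalence proved here is about the
-- RETURN value only.

-- board[i][j] (Python wrap-around on negative indices; 0 where Python would raise IndexError — such
-- inputs are outside Pre_place_mag)
def pvCell (board : List (List Int)) (i j : Int) : Int :=
  PySem.List.pyGetD (PySem.List.pyGetD board i []) j 0

-- board[i][j] = v (total form of Python's assignment; out-of-range inputs are outside Pre_place_mag)
def pvPut (board : List (List Int)) (i j v : Int) : List (List Int) :=
  PySem.List.pySetD board i (PySem.List.pySetD (PySem.List.pyGetD board i []) j v)

-- the knight-move check, literally the last loop of A's is_safe; B's Python has the identical loop,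
-- so both ports share this helper
def pvKnightHit (board : List (List Int)) (n row col : Int) : Bool :=
  [((2:Int),(1:Int)), (1,2), (-1,2), (-2,1), (-2,-1), (-1,-2), (1,-2), (2,-1)].any (fun m =>
    (decide (0 ≤ row + m.1) && decide (row + m.1 < n) &&
     decide (0 ≤ col + m.2) && decide (col + m.2 < n)) && pvCell board (row + m.1) (col + m.2) == 1)

-- ===== PORT A =====
def is_safe (board : List (List Int)) (row col : Int) : Bool :=
  !(PySem.List.pyRange 0 (PySem.List.len board) 1).any (fun i =>
      pvCell board i col == 1 || pvCell board row i == 1) &&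
  (!(PySem.List.pyRange 0 (PySem.List.len board) 1).any (fun i =>
      (PySem.List.pyRange 0 (PySem.List.len board) 1).any (fun j =>
        (i + j == row + col || i - j == row - col) && pvCell board i j == 1)) &&
   !pvKnightHit board (PySem.List.len board) row col)

-- fuel makes the recursion total; board.length^2 + 1 exceeds the depth Python ever reaches
-- (each recursive call turns a non-1 cell of the n×n board into a 1)
def place_mag_fuel : Nat → List (List Int) → Int → Int → Int → Int → Int
  | 0, _, _, _, _, _ => 0
  | (f+1), board, row, _col, count, K =>
    if count == K then 1
    else
      (PySem.List.pyRange row (PySem.List.len board) 1).foldl (fun total i =>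
        (PySem.List.pyRange 0 (PySem.List.len board) 1).foldl (fun total j =>
          if is_safe board i j then
            total + place_mag_fuel f (pvPut board i j 1) i j (count + 1) K
          else total) total) 0

def place_mag (board : List (List Int)) (row : Int) (col : Int) (count : Int) (K : Int) : Int :=
  place_mag_fuel (board.length * board.length + 1) board row col count K

-- ===== PORT B =====
-- one pass: column j, row i, and the two diagonals through (i, j); then the knight probes
def safe_alt (board : List (List Int)) (n i j : Int) : Bool :=
  !(PySem.List.pyRange 0 n 1).any (fun k =>
      pvCell board k j == 1 || pvCell board i k == 1 ||
      ((decide (0 ≤ i + j - k) && decide (i + j - k < n)) && pvCell board k (i + j - k) == 1) ||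
      ((decide (0 ≤ j + k - i) && decide (j + k - i < n)) && pvCell board k (j + k - i) == 1)) &&
  !pvKnightHit board n i j

def place_mag_alt_fuel : Nat → List (List Int) → Int → Int → Int → Int → Int
  | 0, _, _, _, _, _ => 0
  | (f+1), board, row, _col, count, K =>
    if count == K then 1
    else
      (PySem.List.pyRange (row * PySem.List.len board)
                          (PySem.List.len board * PySem.List.len board) 1).foldl (fun total pos =>
        if safe_alt board (PySem.List.len board)
             (PySem.Int.floordiv pos (PySem.List.len board)) (PySem.Int.mod pos (PySem.List.len board)) then
          total + place_mag_alt_fuel f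
            (pvPut board (PySem.Int.floordiv pos (PySem.List.len board)) (PySem.Int.mod pos (PySem.List.len board)) 1)
            (PySem.Int.floordiv pos (PySem.List.len board)) (PySem.Int.mod pos (PySem.List.len board)) (count + 1) K
        else total) 0

def place_mag_alt (board : List (List Int)) (row : Int) (col : Int) (count : Int) (K : Int) : Int :=
  place_mag_alt_fuel (board.length * board.length + 1) board row col count K

-- ===== PRECONDITION & SPEC =====
-- Pre_ excludes exactly the inputs Python A does not handle as a plain square-board search:
-- ragged boards with a row shorter than len(board) (A raises IndexError except when an early
-- occupied cell hides the short row) and row < -len(board) (A raises except under the same early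
-- exit); negative-index wraparound for -len(board) ≤ row < 0 stays inside Pre_ and is matched.
def Pre_place_mag (board : List (List Int)) (row : Int) (col : Int) (count : Int) (K : Int) : Prop :=
  count = K ∨ board = [] ∨ (board.length : Int) ≤ row ∨
  (-(board.length : Int) ≤ row ∧ ∀ r ∈ board, board.length ≤ r.length)
instance (board : List (List Int)) (row : Int) (col : Int) (count : Int) (K : Int) : Decidable (Pre_place_mag board row col count K) := by unfold Pre_place_mag; infer_instance

def pvWitness_place_mag : List (List Int) × Int × Int × Int × Int := ([[0,0],[0,0]], 0, 0, 0, 1)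

def Spec_place_mag (board : List (List Int)) (row : Int) (col : Int) (count : Int) (K : Int) (out : Int) : Prop := out = place_mag_alt board row col count K
instance (board : List (List Int)) (row : Int) (col : Int) (count : Int) (K : Int) (out : Int) : Decidable (Spec_place_mag board row col count K out) := by unfold Spec_place_mag; infer_instance

-- ===== CLAIM (what is proved, stated in full; the proofs are below) =====
def Claim_equal_place_mag : Prop := ∀ (board : List (List Int)) (row : Int) (col : Int) (count : Int) (K : Int), Dom_place_mag board row col count K → Pre_place_mag board row col count K → Spec_place_mag board row col count K (place_mag board row col count K)

-- ===== LEMMAS AND PROOFS =====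

theorem pvWitness_ok : Dom_place_mag pvWitness_place_mag.1 pvWitness_place_mag.2.1 pvWitness_place_mag.2.2.1 pvWitness_place_mag.2.2.2.1 pvWitness_place_mag.2.2.2.2 ∧ Pre_place_mag pvWitness_place_mag.1 pvWitness_place_mag.2.1 pvWitness_place_mag.2.2.1 pvWitness_place_mag.2.2.2.1 pvWitness_place_mag.2.2.2.2 := by
  constructor <;> decide

-- A's three safety sweeps test exactly the cells B's single pass tests
theorem safe_eq (board : List (List Int)) (i j : Int) :
    is_safe board i j = safe_alt board (PySem.List.len board) i j := by
  unfold is_safe safe_alt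
  have hcore :
      ((PySem.List.pyRange 0 (PySem.List.len board) 1).any (fun a =>
          pvCell board a j == 1 || pvCell board i a == 1) ||
       (PySem.List.pyRange 0 (PySem.List.len board) 1).any (fun a =>
          (PySem.List.pyRange 0 (PySem.List.len board) 1).any (fun b =>
            (a + b == i + j || a - b == i - j) && pvCell board a b == 1)))
      =
      (PySem.List.pyRange 0 (PySem.List.len board) 1).any (fun k =>
        pvCell board k j == 1 || pvCell board i k == 1 ||
        ((decide (0 ≤ i + j - k) && decide (i + j - k < PySem.List.len board)) && pvCell board k (i + j - k) == 1) ||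
        ((decide (0 ≤ j + k - i) && decide (j + k - i < PySem.List.len board)) && pvCell board k (j + k - i) == 1)) := by
    rw [Bool.eq_iff_iff]
    simp only [List.any_eq_true, PySem.List.mem_pyRange_one, Bool.or_eq_true, Bool.and_eq_true,
      decide_eq_true_eq, beq_iff_eq]
    constructor
    · rintro (⟨a, ha, h | h⟩ | ⟨a, ha, b, hb, hab, hc⟩)
      · exact ⟨a, ha, Or.inl (Or.inl (Or.inl h))⟩
      · exact ⟨a, ha, Or.inl (Or.inl (Or.inr h))⟩
      · rcases hab with h | h
        · refine ⟨a, ha, Or.inl (Or.inr ⟨⟨by omega, by omega⟩, ?_⟩)⟩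
          have hb' : i + j - a = b := by omega
          rw [hb']; exact hc
        · refine ⟨a, ha, Or.inr ⟨⟨by omega, by omega⟩, ?_⟩⟩
          have hb' : j + a - i = b := by omega
          rw [hb']; exact hc
    · rintro ⟨k, hk, ((h | h) | ⟨hb, hc⟩) | ⟨hb, hc⟩⟩
      · exact Or.inl ⟨k, hk, Or.inl h⟩
      · exact Or.inl ⟨k, hk, Or.inr h⟩
      · exact Or.inr ⟨k, hk, i + j - k, by omega, Or.inl (by omega), hc⟩
      · exact Or.inr ⟨k, hk, j + k - i, by omega, Or.inr (by omega), hc⟩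
  rw [← hcore, Bool.not_or, Bool.and_assoc]

-- range(row*n, n*n) is the concatenation over i of range(i*n, i*n+n)
theorem pyRange_mul_flat (row n : Int) (hn : 0 ≤ n) :
    PySem.List.pyRange (row * n) (n * n) 1 =
      (PySem.List.pyRange row n 1).flatMap (fun i =>
        (PySem.List.pyRange 0 n 1).map (fun j => i * n + j)) := by
  by_cases h : n ≤ row
  · rw [PySem.List.pyRange_one_eq_nil h, PySem.List.pyRange_one_eq_nil (by nlinarith)]
    simp
  · have key : ∀ (k : Nat) (row : Int), row ≤ n → (n - row).toNat = k →
        PySem.List.pyRange (row * n) (n * n) 1 =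
          (PySem.List.pyRange row n 1).flatMap (fun i =>
            (PySem.List.pyRange 0 n 1).map (fun j => i * n + j)) := by
      intro k
      induction k with
      | zero =>
          intro row hle hk
          have hrn : row = n := by omega
          subst hrn
          rw [PySem.List.pyRange_one_eq_nil le_rfl, PySem.List.pyRange_one_eq_nil le_rfl]
          simp
      | succ k ih =>
          intro row hle hk
          have hlt : row < n := by omega
          rw [PySem.List.pyRange_one_cons hlt]
          have hsplit : PySem.List.pyRange (row * n) (n * n) 1 =
              PySem.List.pyRange (row * n) ((row + 1) * n) 1 ++
                PySem.List.pyRange ((row + 1) * n) (n * n) 1 := by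
            apply PySem.List.pyRange_one_append <;> nlinarith
          rw [hsplit, List.flatMap_cons, ih (row + 1) (by omega) (by omega)]
          congr 1
          have hrn : (row + 1) * n = row * n + n := by ring
          rw [hrn]
          rw [show (PySem.List.pyRange 0 n 1).map (fun j => row * n + j)
                = PySem.List.pyRange (row * n) (row * n + n) 1 from by simp [PySem.List.pyRange_one]]
    exact key (n - row).toNat row (by omega) rfl

theorem decode_div (i j n : Int) (hn : 0 < n) (h0 : 0 ≤ j) (h1 : j < n) :
    PySem.Int.floordiv (i * n + j) n = i ∧ PySem.Int.mod (i * n + j) n = j := by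
  have hd : PySem.Int.floordiv (i * n + j) n = i := by
    rw [PySem.Int.floordiv_eq_iff_of_pos hn]
    constructor <;> nlinarith
  refine ⟨hd, ?_⟩
  have hm := PySem.Int.floordiv_mul_add_mod (i * n + j) n
  rw [hd] at hm
  linarith

theorem fuel_eq : ∀ (f : Nat) (board : List (List Int)) (row col count K : Int),
    place_mag_fuel f board row col count K = place_mag_alt_fuel f board row col count K := by
  intro f
  induction f with
  | zero => intro board row col count K; rfl
  | succ f ih =>
      intro board row col count K
      show (if count == K then 1 else _) = (if count == K then 1 else _)
      by_cases hck : count == K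
      · simp [hck]
      · simp only [hck, Bool.false_eq_true, if_false]
        rw [pyRange_mul_flat row (PySem.List.len board) (by simp [PySem.List.len_eq]),
            List.foldl_flatMap]
        apply PySem.List.foldl_congr_mem
        intro acc i _
        rw [List.foldl_map]
        apply PySem.List.foldl_congr_mem
        intro acc' x hx
        have hxm := PySem.List.mem_pyRange_one.mp hx
        obtain ⟨hfd, hmd⟩ := decode_div i x (PySem.List.len board) (by omega) hxm.1 hxm.2
        rw [hfd, hmd, safe_eq board i x, ih]

-- ===== VERDICT (by name: the statement is the Claim_ definition above) =====
theorem place_mag_spec : Claim_equal_place_mag := by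
  intro board row col count K _ _
  unfold Spec_place_mag place_mag place_mag_alt
  exact fuel_eq _ board row col count K
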